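-- pv_equiv track=rewrite | github.com/lisaula/Proyecto-Python-NextU | eWallet.py | stringBuilder
-- ===== SOURCE A (Python) =====
-- def stringBuilder(amount, str, caracter = " ", centerContext = True):
--     strPrinteable = ""
--     strLen = len(str)
--     if (centerContext == True) :
--         centerIndex = int(amount / 2) - int(strLen / 2)
--     else:
--         centerIndex = 0
--     for x in range(amount):
--         if(x < centerIndex):
--             strPrinteable += caracter
--         elif(x >= centerIndex and x < centerIndex + strLen):
--             index = x - centerIndex
--             strPrinteable += str[index]
--         else:
--             strPrinteable += caracter
--     return strPrinteable
-- ===== SOURCE B (Python) =====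
-- def stringBuilder(amount, str, caracter=" ", centerContext=True):
--     if amount <= 0:
--         return ""
--     strLen = len(str)
--     centerIndex = amount // 2 - strLen // 2 if centerContext else 0
--     x_start = max(0, centerIndex)
--     x_end = min(amount, centerIndex + strLen)
--     mid = str[x_start - centerIndex : x_end - centerIndex] if x_start < x_end else ""
--     return caracter * max(centerIndex, 0) + mid + caracter * (amount - max(x_end, x_start))
-- ===== Notes on version B (the rewrite author's own statement) =====
-- stated objective: faster
-- what changed: Replaces the per-position loop that appends one piece per index with a closed-form computation of the three output segments (left padding, visible slice of str, right padding) built by string repetition and slicing and concatenated once.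
import Mathlib
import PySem

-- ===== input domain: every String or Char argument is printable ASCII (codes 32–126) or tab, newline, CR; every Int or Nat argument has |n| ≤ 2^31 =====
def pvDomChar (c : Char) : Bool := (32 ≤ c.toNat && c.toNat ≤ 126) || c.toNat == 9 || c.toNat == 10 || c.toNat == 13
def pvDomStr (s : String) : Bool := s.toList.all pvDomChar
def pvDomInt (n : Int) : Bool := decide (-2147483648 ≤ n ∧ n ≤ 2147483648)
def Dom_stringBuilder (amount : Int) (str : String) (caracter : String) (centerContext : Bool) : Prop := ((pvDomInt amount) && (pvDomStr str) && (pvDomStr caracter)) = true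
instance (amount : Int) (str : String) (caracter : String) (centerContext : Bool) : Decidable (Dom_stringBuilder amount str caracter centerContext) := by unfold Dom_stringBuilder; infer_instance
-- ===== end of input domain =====

-- B replaces A's per-position append loop with a closed-form three-segment concatenation (left padding ++ visible slice ++ right padding); objective: simpler.

-- ===== PORT A =====
-- Literal port of A: build the string by folding over range(amount), appending per position.
-- str[index] is ported with pyGetD (the elif guard keeps the index in range, so Python never raises here).
def stringBuilder (amount : Int) (str : String) (caracter : String) (centerContext : Bool) : String :=
  let strLen : Int := PySem.Str.len str
  let centerIndex : Int :=
    if centerContext = true then PySem.Int.truncdiv amount 2 - PySem.Int.truncdiv strLen 2 else 0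
  String.ofList
    ((PySem.List.pyRange 0 amount 1).foldl
      (fun acc x =>
        if x < centerIndex then acc ++ caracter.toList
        else if centerIndex ≤ x ∧ x < centerIndex + strLen then
          acc ++ [PySem.List.pyGetD str.toList (x - centerIndex) ' ']
        else acc ++ caracter.toList) [])

-- ===== PORT B =====
-- Literal port of Source B: 'caracter * k' is (List.replicate k caracter.toList).flatten, 'str[a:b]' is PySem.List.slice.
def stringBuilder_alt (amount : Int) (str : String) (caracter : String) (centerContext : Bool) : String :=
  if amount ≤ 0 then "" else
  let strLen : Int := PySem.Str.len str
  let centerIndex : Int :=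
    if centerContext = true then PySem.Int.floordiv amount 2 - PySem.Int.floordiv strLen 2 else 0
  let xStart : Int := max 0 centerIndex
  let xEnd : Int := min amount (centerIndex + strLen)
  let mid : List Char :=
    if xStart < xEnd then
      PySem.List.slice str.toList (some (xStart - centerIndex)) (some (xEnd - centerIndex))
    else []
  String.ofList
    ((List.replicate (max centerIndex 0).toNat caracter.toList).flatten ++ mid ++
      (List.replicate (amount - max xEnd xStart).toNat caracter.toList).flatten)

-- ===== PRECONDITION & SPEC =====
def Spec_stringBuilder (amount : Int) (str : String) (caracter : String) (centerContext : Bool) (out : String) : Prop := out = stringBuilder_alt amount str caracter centerContext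
instance (amount : Int) (str : String) (caracter : String) (centerContext : Bool) (out : String) : Decidable (Spec_stringBuilder amount str caracter centerContext out) := by unfold Spec_stringBuilder; infer_instance

-- ===== CLAIM (what is proved, stated in full; the proofs are below) =====
def Claim_equal_stringBuilder : Prop := ∀ (amount : Int) (str : String) (caracter : String) (centerContext : Bool), Dom_stringBuilder amount str caracter centerContext → Spec_stringBuilder amount str caracter centerContext (stringBuilder amount str caracter centerContext)

-- ===== LEMMAS AND PROOFS =====

-- flatMap respects pointwise equality on members.
theorem flatMap_congr_mem {α β : Type} (l : List α) (f g : α → List β)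
    (h : ∀ x ∈ l, f x = g x) : l.flatMap f = l.flatMap g := by
  induction l with
  | nil => rfl
  | cons y ys ih =>
    simp only [List.flatMap_cons]
    rw [h y (by simp), ih (fun x hx => h x (by simp [hx]))]

-- A flatMap over an integer range whose body is constant on the range is a flattened replicate.
theorem flatMap_pyRange_const (a b : Int) (c : List Char) (g : Int → List Char)
    (h : ∀ x, a ≤ x → x < b → g x = c) :
    (PySem.List.pyRange a b 1).flatMap g = (List.replicate (b - a).toNat c).flatten := by
  have h1 : (PySem.List.pyRange a b 1).map g = (PySem.List.pyRange a b 1).map (fun _ => c) :=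
    List.map_congr_left (fun x hx => by
      rw [PySem.List.mem_pyRange_one] at hx
      exact h x hx.1 hx.2)
  rw [List.flatMap_def, h1, List.map_const', PySem.List.length_pyRange_one]

-- A flatMap of singleton lookups over a range is a contiguous sub-list.
theorem flatMap_pyRange_get (L : List Char) (a b off : Int)
    (hoff : 0 ≤ a - off) (hab : a ≤ b) (hb : b - off ≤ (L.length : Int)) :
    (PySem.List.pyRange a b 1).flatMap (fun x => [PySem.List.pyGetD L (x - off) ' ']) =
      (L.drop (a - off).toNat).take (b - a).toNat := by
  rw [PySem.List.pyRange_one, List.flatMap_map]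
  have hmap : ∀ (l : List Nat) (f : Nat → Char),
      l.flatMap (fun k => [f k]) = l.map f := by
    intro l f
    induction l with
    | nil => rfl
    | cons y ys ih => simp [List.flatMap_cons, ih]
  rw [hmap (List.range (b - a).toNat) (fun k => PySem.List.pyGetD L (a + (k : Int) - off) ' ')]
  apply List.ext_getElem
  · simp only [List.length_map, List.length_range, List.length_take, List.length_drop]
    omega
  · intro i h1 h2
    simp only [List.getElem_map, List.getElem_range, List.getElem_take, List.getElem_drop]
    have hlen : (a - off).toNat + i < L.length := by
      simp only [List.length_map, List.length_range] at h1
      omega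
    have hkey : PySem.List.pyGetD L (a + (i : Int) - off) ' '
        = L[(a + (i : Int) - off).toNat] := by
      rw [PySem.List.pyGetD_eq_getElem]
      · omega
      · omega
    rw [hkey]
    congr 1
    omega

-- ===== VERDICT (by name: the statement is the Claim_ definition above) =====
theorem stringBuilder_spec : Claim_equal_stringBuilder := by
  intro amount str caracter centerContext _dom
  show stringBuilder amount str caracter centerContext
      = stringBuilder_alt amount str caracter centerContext
  simp only [stringBuilder, stringBuilder_alt]
  by_cases hneg : amount ≤ 0
  · rw [if_pos hneg, PySem.List.pyRange_one_eq_nil hneg]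
    rfl
  · rw [if_neg hneg]
    have hamt : 0 < amount := by omega
    have hlen : PySem.Str.len str = (str.toList.length : Int) := by
      simp [PySem.Str.len_eq]
    set n : Int := (str.toList.length : Int) with hn
    have hn0 : 0 ≤ n := by positivity
    -- the two centerIndex computations agree
    have hci : (if centerContext = true then
          PySem.Int.truncdiv amount 2 - PySem.Int.truncdiv (PySem.Str.len str) 2 else 0)
        = (if centerContext = true then
          PySem.Int.floordiv amount 2 - PySem.Int.floordiv (PySem.Str.len str) 2 else 0) := by
      cases centerContext with
      | false => rfl
      | true =>
        simp only [hlen]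
        unfold PySem.Int.truncdiv
        rw [Int.tdiv_eq_ediv_of_nonneg (by omega), Int.tdiv_eq_ediv_of_nonneg hn0,
          PySem.Int.floordiv_eq_ediv_of_pos (a := amount) (by omega),
          PySem.Int.floordiv_eq_ediv_of_pos (a := n) (by omega)]
    rw [hci, hlen]
    set ci : Int := (if centerContext = true then
        PySem.Int.floordiv amount 2 - PySem.Int.floordiv n 2 else 0) with hcidef
    have hciv : ci = (if centerContext = true then amount / 2 - n / 2 else 0) := by
      rw [hcidef, PySem.Int.floordiv_eq_ediv_of_pos (a := amount) (by omega),
        PySem.Int.floordiv_eq_ediv_of_pos (a := n) (by omega)]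
    -- arithmetic facts about ci
    have hciA : ci ≤ amount := by rw [hciv]; split <;> omega
    have hciB : 0 ≤ ci + n := by rw [hciv]; split <;> omega
    set xs : Int := max 0 ci with hxs
    set xe : Int := min amount (ci + n) with hxe
    have h0xs : 0 ≤ xs := by omega
    have hxsxe : xs ≤ xe := by omega
    have hxeam : xe ≤ amount := by omega
    -- the loop body appends a per-position piece
    set g : Int → List Char := fun x =>
      if x < ci then caracter.toList
      else if ci ≤ x ∧ x < ci + n then [PySem.List.pyGetD str.toList (x - ci) ' ']
      else caracter.toList with hg
    have hbody : (fun (acc : List Char) x =>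
        if x < ci then acc ++ caracter.toList
        else if ci ≤ x ∧ x < ci + n then acc ++ [PySem.List.pyGetD str.toList (x - ci) ' ']
        else acc ++ caracter.toList) = fun acc x => acc ++ g x := by
      funext acc x
      simp only [hg]
      split_ifs <;> rfl
    rw [hbody, PySem.List.foldl_append_eq_flatMap, List.nil_append,
      PySem.List.pyRange_one_append 0 xs amount h0xs (by omega),
      PySem.List.pyRange_one_append xs xe amount hxsxe hxeam,
      List.flatMap_append, List.flatMap_append]
    conv_rhs => rw [List.append_assoc]
    have hleft := flatMap_pyRange_const 0 xs caracter.toList g (fun x hx1 hx2 => by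
      rw [hg]
      have hlt : x < ci := by omega
      simp [hlt])
    have hmid1 := flatMap_congr_mem (PySem.List.pyRange xs xe 1) g
      (fun x => [PySem.List.pyGetD str.toList (x - ci) ' '])
      (fun x hx => by
        rw [PySem.List.mem_pyRange_one] at hx
        rw [hg]
        have h1 : ¬ x < ci := by omega
        have h2 : ci ≤ x ∧ x < ci + n := by omega
        simp [h1, h2])
    have hmid2 := flatMap_pyRange_get str.toList xs xe ci (by omega) hxsxe (by omega)
    have hright := flatMap_pyRange_const xe amount caracter.toList g (fun x hx1 hx2 => by
      rw [hg]
      have h1 : ¬ x < ci := by omega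
      have h2 : ¬ (ci ≤ x ∧ x < ci + n) := by omega
      simp [h1, h2])
    have hrep1 : (xs - 0).toNat = (max ci 0).toNat := by omega
    have hrep2 : (amount - xe).toNat = (amount - max xe xs).toNat := by omega
    rw [hleft, hmid1, hmid2, hright, hrep1, hrep2]
    congr 1
    congr 1
    by_cases hmidc : xs < xe
    · rw [if_pos hmidc, PySem.List.slice_toNat str.toList (by omega) (by omega)]
      have hto : (xe - ci).toNat - (xs - ci).toNat = (xe - xs).toNat := by omega
      rw [hto]
    · rw [if_neg hmidc]
      have hto : (xe - xs).toNat = 0 := by omega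
      rw [hto, List.take_zero]
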